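-- pv_equiv track=rewrite | github.com/miliar/Code_Jam_Webscraper | solutions_python/Problem_126/409.py | consec
-- ===== SOURCE A (Python) =====
-- def consec(conv, n):
-- 	for i in range(len(conv) - n + 1):
-- 		count = 0
-- 		for j in range(n):
-- 			count += conv[i + j]
-- 		if count == n:
-- 			return True
-- 	return False
-- ===== SOURCE B (Python) =====
-- def consec(conv, n):
--     if n < 0 or n > len(conv):
--         return False
--     s = sum(conv[:n])
--     if s == n:
--         return True
--     for i in range(n, len(conv)):
--         s += conv[i] - conv[i - n]
--         if s == n:
--             return True
--     return False
-- ===== Notes on version B (the rewrite author's own statement) =====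
-- stated objective: faster
-- what changed: Replaced A's recomputation of every length-n window sum (nested loops) by a single sliding-window running sum updated in one pass, with an up-front bounds guard.
import Mathlib
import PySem

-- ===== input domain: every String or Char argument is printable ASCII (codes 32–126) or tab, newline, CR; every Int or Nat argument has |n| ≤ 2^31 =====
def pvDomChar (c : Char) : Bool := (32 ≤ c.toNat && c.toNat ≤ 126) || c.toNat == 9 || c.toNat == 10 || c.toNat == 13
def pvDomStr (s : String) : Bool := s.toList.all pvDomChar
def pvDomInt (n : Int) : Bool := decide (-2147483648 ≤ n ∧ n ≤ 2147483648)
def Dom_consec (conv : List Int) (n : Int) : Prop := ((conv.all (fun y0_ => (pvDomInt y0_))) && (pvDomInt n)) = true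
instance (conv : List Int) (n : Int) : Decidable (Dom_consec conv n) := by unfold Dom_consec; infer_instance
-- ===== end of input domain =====

-- B replaces A's recomputation of each length-n window sum by a single sliding-window
-- running sum (objective: faster, one pass).

-- ===== PORT A =====
-- inner loop: count = 0; for j in range(n): count += conv[i + j]
def consecInner (conv : List Int) (n i : Int) : Int :=
  (PySem.List.pyRange 0 n 1).foldl (fun c j => c + PySem.List.pyGetD conv (i + j) 0) 0

-- outer loop with early return True
def consecLoop (conv : List Int) (n : Int) : List Int → Bool
  | [] => false
  | i :: rest => if consecInner conv n i = n then true else consecLoop conv n rest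

def consec (conv : List Int) (n : Int) : Bool :=
  consecLoop conv n (PySem.List.pyRange 0 ((conv.length : Int) - n + 1) 1)

-- ===== PORT B =====
-- for i in range(n, len(conv)): s += conv[i] - conv[i-n]; if s == n: return True
def slideLoop (conv : List Int) (n : Int) (s : Int) : List Int → Bool
  | [] => false
  | i :: rest =>
    let s' := s + PySem.List.pyGetD conv i 0 - PySem.List.pyGetD conv (i - n) 0
    if s' = n then true else slideLoop conv n s' rest

def consec_alt (conv : List Int) (n : Int) : Bool :=
  if n < 0 ∨ (conv.length : Int) < n then false
  else
    let s := (PySem.List.slice conv none (some n)).sum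
    if s = n then true
    else slideLoop conv n s (PySem.List.pyRange n (conv.length : Int) 1)

-- ===== PRECONDITION & SPEC =====
def Spec_consec (conv : List Int) (n : Int) (out : Bool) : Prop := out = consec_alt conv n
instance (conv : List Int) (n : Int) (out : Bool) : Decidable (Spec_consec conv n out) := by unfold Spec_consec; infer_instance

-- ===== CLAIM (what is proved, stated in full; the proofs are below) =====
def Claim_equal_consec : Prop := ∀ (conv : List Int) (n : Int), Dom_consec conv n → Spec_consec conv n (consec conv n)

-- ===== LEMMAS AND PROOFS =====

-- pointwise-on-members congruence for List.any (proof-only helper)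
theorem anyCongrMem {α : Type} (l : List α) (p q : α → Bool)
    (h : ∀ a ∈ l, p a = q a) : l.any p = l.any q := by
  induction l with
  | nil => rfl
  | cons x xs ih => simp_all [List.any_cons]

-- prefix sum and window sum (proof-only helpers)
def pfx (conv : List Int) (m : Nat) : Int := (conv.take m).sum
def wsum (conv : List Int) (nt k : Nat) : Int := pfx conv (k + nt) - pfx conv k

theorem pfx_succ (conv : List Int) (m : Nat) (h : m < conv.length) :
    pfx conv (m + 1) = pfx conv m + conv[m] := by
  simp [pfx, List.sum_take_succ conv m h]

-- A's outer loop is an `any`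
theorem consecLoop_eq_any (conv : List Int) (n : Int) (l : List Int) :
    consecLoop conv n l = l.any (fun i => consecInner conv n i = n) := by
  induction l with
  | nil => rfl
  | cons i rest ih => by_cases h : consecInner conv n i = n <;> simp [consecLoop, h, ih]

-- A's inner loop computes the window sum
theorem consecInner_eq (conv : List Int) (nt k : Nat) (h : k + nt ≤ conv.length) :
    consecInner conv (nt : Int) (k : Int) = wsum conv nt k := by
  have main : ∀ m : Nat, m ≤ nt →
      (PySem.List.pyRange 0 (m : Int) 1).foldl
        (fun c j => c + PySem.List.pyGetD conv ((k : Int) + j) 0) 0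
      = wsum conv m k := by
    intro m hm
    induction m with
    | zero => simp [PySem.List.pyRange_one_eq_nil, wsum, pfx]
    | succ m ih =>
      have hm' : m ≤ nt := Nat.le_of_succ_le hm
      have hrange : PySem.List.pyRange 0 ((m + 1 : Nat) : Int) 1
          = PySem.List.pyRange 0 (m : Int) 1 ++ [(m : Int)] := by
        have := PySem.List.pyRange_one_succ_right (a := 0) (b := (m : Int)) (by positivity)
        push_cast
        simpa using this
      have hidx : k + m < conv.length := by omega
      have hget : PySem.List.pyGetD conv ((k : Int) + (m : Int)) 0 = conv[k + m] := by
        have : ((k : Int) + (m : Int)) = ((k + m : Nat) : Int) := by push_cast; ring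
        rw [this, PySem.List.pyGetD_natCast]
        simp [List.getD, hidx]
      rw [hrange, List.foldl_append, ih hm']
      simp only [List.foldl_cons, List.foldl_nil, hget]
      have := pfx_succ conv (k + m) hidx
      simp only [wsum]
      have e : k + (m + 1) = k + m + 1 := by omega
      rw [e]
      omega
  simpa [consecInner] using main nt le_rfl

-- B's sliding loop checks windows k+1, k+2, … given state = window k
theorem slideLoop_eq (conv : List Int) (nt : Nat) (hpos : 0 < nt) :
    ∀ m k : Nat, k + nt + m = conv.length →
    slideLoop conv (nt : Int) (wsum conv nt k)
        (PySem.List.pyRange ((k + nt : Nat) : Int) (conv.length : Int) 1)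
      = (List.range m).any (fun j => wsum conv nt (k + 1 + j) = (nt : Int)) := by
  intro m
  induction m with
  | zero =>
    intro k hk
    rw [PySem.List.pyRange_one_eq_nil (by omega)]
    simp [slideLoop]
  | succ m ih =>
    intro k hk
    have hlt : ((k + nt : Nat) : Int) < (conv.length : Int) := by push_cast; omega
    rw [PySem.List.pyRange_one_cons hlt]
    simp only [slideLoop]
    have h1 : k + nt < conv.length := by omega
    have h2 : k < conv.length := by omega
    have hg1 : PySem.List.pyGetD conv ((k + nt : Nat) : Int) 0 = conv[k + nt] := by
      rw [PySem.List.pyGetD_natCast]; simp [List.getD, h1]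
    have hg2 : PySem.List.pyGetD conv (((k + nt : Nat) : Int) - (nt : Int)) 0 = conv[k] := by
      have : ((k + nt : Nat) : Int) - (nt : Int) = ((k : Nat) : Int) := by push_cast; ring
      rw [this, PySem.List.pyGetD_natCast]; simp [List.getD, h2]
    have hstep : wsum conv nt k + PySem.List.pyGetD conv ((k + nt : Nat) : Int) 0
        - PySem.List.pyGetD conv (((k + nt : Nat) : Int) - (nt : Int)) 0
        = wsum conv nt (k + 1) := by
      rw [hg1, hg2]
      have e1 := pfx_succ conv (k + nt) h1
      have e2 := pfx_succ conv k h2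
      simp only [wsum] at *
      have : k + 1 + nt = k + nt + 1 := by omega
      rw [this]
      omega
    rw [hstep]
    have hcons : ((k + nt : Nat) : Int) + 1 = ((k + 1 + nt : Nat) : Int) := by push_cast; ring
    rw [hcons]
    have ihk := ih (k + 1) (by omega)
    rw [List.range_succ_eq_map]
    by_cases hEq : wsum conv nt (k + 1) = (nt : Int)
    · simp [hEq]
    · rw [if_neg hEq, ihk, List.any_cons, List.any_map]
      have hdec' : (decide (wsum conv nt (k + 1 + 0) = (nt : Int)) : Bool) = false := by
        simpa using hEq
      rw [hdec', Bool.false_or]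
      refine anyCongrMem _ _ _ fun j hj => ?_
      simp only [Function.comp_apply, Nat.succ_eq_add_one]
      have e : k + 1 + 1 + j = k + 1 + (j + 1) := by omega
      rw [e]

-- main equivalence
theorem consec_eq_alt (conv : List Int) (n : Int) : consec conv n = consec_alt conv n := by
  by_cases hneg : n < 0
  · -- A: every inner count is 0 ≠ n; B: guard
    have hB : consec_alt conv n = false := by
      simp [consec_alt, hneg]
    rw [hB, consec, consecLoop_eq_any]
    simp only [List.any_eq_false]
    intro i _
    have : consecInner conv n i = 0 := by
      simp [consecInner, PySem.List.pyRange_one_eq_nil (by omega : n ≤ 0)]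
    simp [this]; omega
  · push_neg at hneg
    obtain ⟨nt, rfl⟩ := Int.eq_ofNat_of_zero_le hneg
    by_cases hbig : conv.length < nt
    · -- A: empty outer range; B: guard
      have hA : consec ((conv : List Int)) (nt : Int) = false := by
        rw [consec, PySem.List.pyRange_one_eq_nil (by push_cast; omega)]
        rfl
      have hB : consec_alt conv (nt : Int) = false := by
        rw [consec_alt, if_pos (Or.inr (by push_cast; omega))]
      rw [hA, hB]
    · push_neg at hbig
      -- 0 ≤ nt ≤ len
      have hsl : (PySem.List.slice conv none (some ((nt : Nat) : Int))).sum = wsum conv nt 0 := by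
        rw [PySem.List.slice_to_natCast]
        simp [wsum, pfx]
      have hA : consec conv (nt : Int)
          = (List.range (conv.length - nt + 1)).any (fun k => wsum conv nt k = (nt : Int)) := by
        rw [consec, consecLoop_eq_any]
        have hrange : PySem.List.pyRange 0 ((conv.length : Int) - (nt : Int) + 1) 1
            = (List.range (conv.length - nt + 1)).map (fun k => ((k : Nat) : Int)) := by
          rw [PySem.List.pyRange_one]
          have : (((conv.length : Int) - (nt : Int) + 1) - 0).toNat = conv.length - nt + 1 := by
            omega
          rw [this]
          simp
        rw [hrange, List.any_map]
        refine anyCongrMem _ _ _ fun k hk => ?_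
        simp only [List.mem_range] at hk
        simp [Function.comp, consecInner_eq conv nt k (by omega)]
      rw [hA, consec_alt, if_neg (by push_cast; omega)]
      simp only [hsl]
      by_cases h0 : wsum conv nt 0 = (nt : Int)
      · -- first window matches: both true
        rw [if_pos h0]
        have : 0 ∈ List.range (conv.length - nt + 1) := by simp
        rw [List.any_eq_true]
        exact ⟨0, this, by simp [h0]⟩
      · rw [if_neg h0]
        by_cases hz : nt = 0
        · exfalso; apply h0; simp [hz, wsum]
        · have hpos : 0 < nt := Nat.pos_of_ne_zero hz
          have hs := slideLoop_eq conv nt hpos (conv.length - nt) 0 (by omega)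
          have e0 : 0 + nt = nt := by omega
          rw [e0] at hs
          rw [hs, List.range_succ_eq_map, List.any_cons, List.any_map]
          have hdec0 : (decide (wsum conv nt 0 = (nt : Int)) : Bool) = false := by
            simpa using h0
          rw [hdec0, Bool.false_or]
          refine anyCongrMem _ _ _ fun j hj => ?_
          simp only [Function.comp_apply, Nat.succ_eq_add_one]
          have e : 0 + 1 + j = j + 1 := by omega
          rw [e]

-- ===== VERDICT (by name: the statement is the Claim_ definition above) =====
theorem consec_spec : Claim_equal_consec := by
  intro conv n _
  unfold Spec_consec
  exact consec_eq_alt conv n
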